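-- pv_equiv track=rewrite | github.com/Frank-Gu-Lab/disco_deployment_test | src/discoprocess/data_wrangling_helpers.py | count_sheets
-- ===== SOURCE A (Python) =====
-- def count_sheets(name_sheets):
--     """This function counts the number of sample and control datasheets from which data will be extracted for further processing.
--
--     Parameters
--     ----------
--     name_sheets : list
--         List of sheet names.
--
--     Returns
--     -------
--     num_samples : int
--         Number of sheets containing sample data.
--
--     num_controls : int
--         Number of sheets containing control data.
--
--     sample_control_initializer : list
--         List of Excel sheets containing all sample and control data.
--
--     sample_replicate_initializer : list
--         List of integers containing the replicate number of each sample sheet in sample_control_initializer.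
--
--     control_replicate_initializer : list
--         List of integers containing the replicate number of each control sheet in sample_control_initializer.
--     """
--     # initialize number of samples and controls to zero, then initialize the "list initializers" which will hold book-level data to eventually add to the book-level dataframe.
--     num_samples = 0
--     num_controls = 0
--
--     sample_control_initializer = []
--     sample_replicate_initializer = []
--     control_replicate_initializer = []
--
--     # loop through sheet names to determine number of samples and controls in this book
--     for s in range(len(name_sheets)):
--
--         # if the current sheet is labeled Sample:
--         # increment sample counter, add a list item called 'sample' to be initialized into the 'sample_or_control' list, add a list item of the replicate number to be initialized into the 'replicate' list.
--         if ('Sample' or 'sample') in name_sheets[s]: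
--             num_samples += 1
--             sample_control_initializer.append('sample')
--             sample_replicate_initializer.append(num_samples)
--
--         # if the current sheet is labeled Control:
--         # increment control counter, add a list item called 'control' to be initialized into the 'sample_or_control' list, add a list item of the replicate number to be initialized into the 'replicate' list.
--         elif ('Control' or 'control') in name_sheets[s]:
--             num_controls += 1
--             sample_control_initializer.append('control')
--             control_replicate_initializer.append(num_controls)
--
--     return num_samples, num_controls, sample_control_initializer, sample_replicate_initializer, control_replicate_initializer
-- ===== SOURCE B (Python) =====
-- def count_sheets(name_sheets):
--     # labels-first pass, then counts and closed-form replicate ranges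
--     sample_control_initializer = []
--     for sheet in name_sheets:
--         if 'Sample' in sheet:
--             sample_control_initializer.append('sample')
--         elif 'Control' in sheet:
--             sample_control_initializer.append('control')
--     num_samples = sample_control_initializer.count('sample')
--     num_controls = sample_control_initializer.count('control')
--     sample_replicate_initializer = list(range(1, num_samples + 1))
--     control_replicate_initializer = list(range(1, num_controls + 1))
--     return num_samples, num_controls, sample_control_initializer, sample_replicate_initializer, control_replicate_initializer
-- ===== Notes on version B (the rewrite author's own statement) =====
-- stated objective: simpler
-- what changed: B drops the running counters and replicate-appending from the loop: one pass builds only the labels list, then the counts are labels.count(...) and the replicate lists are closed-form range(1, n+1) lists instead of appended running counters.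
import Mathlib
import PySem

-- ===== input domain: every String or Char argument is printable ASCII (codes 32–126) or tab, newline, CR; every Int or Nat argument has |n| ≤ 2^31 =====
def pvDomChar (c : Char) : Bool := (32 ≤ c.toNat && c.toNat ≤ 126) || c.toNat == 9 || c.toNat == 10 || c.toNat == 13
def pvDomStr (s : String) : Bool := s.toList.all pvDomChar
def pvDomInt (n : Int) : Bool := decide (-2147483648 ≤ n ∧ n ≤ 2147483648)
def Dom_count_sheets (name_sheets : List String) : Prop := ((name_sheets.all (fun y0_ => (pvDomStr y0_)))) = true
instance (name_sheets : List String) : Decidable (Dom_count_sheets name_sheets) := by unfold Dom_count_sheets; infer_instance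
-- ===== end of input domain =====

-- B replaces A's three running accumulators by a labels-only pass plus count() and
-- closed-form range(1, n+1) replicate lists (objective: simpler; same return value).


-- ===== PORT A =====
-- for s in range(len(name_sheets)): indexed loop carrying the state
-- (num_samples, num_controls, sample_control, sample_replicate, control_replicate);
-- Python's ('Sample' or 'sample') / ('Control' or 'control') evaluate to 'Sample' / 'Control'.
def count_sheets (name_sheets : List String) : Int × Int × List String × List Int × List Int :=
  (PySem.List.pyRange 0 (PySem.List.len name_sheets) 1).foldl
    (fun st s =>
      if PySem.Str.isIn "Sample" (PySem.List.pyGetD name_sheets s "") then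
        (st.1 + 1, st.2.1, st.2.2.1 ++ ["sample"], st.2.2.2.1 ++ [st.1 + 1], st.2.2.2.2)
      else if PySem.Str.isIn "Control" (PySem.List.pyGetD name_sheets s "") then
        (st.1, st.2.1 + 1, st.2.2.1 ++ ["control"], st.2.2.2.1, st.2.2.2.2 ++ [st.2.1 + 1])
      else st)
    (0, 0, [], [], [])

-- ===== PORT B =====
-- labels pass, then counts and closed-form ranges (transliterates Source B)
def count_sheets_alt (name_sheets : List String) : Int × Int × List String × List Int × List Int :=
  let labels := name_sheets.foldl
    (fun acc sheet =>
      if PySem.Str.isIn "Sample" sheet then acc ++ ["sample"]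
      else if PySem.Str.isIn "Control" sheet then acc ++ ["control"]
      else acc) []
  let num_samples : Int := labels.count "sample"
  let num_controls : Int := labels.count "control"
  (num_samples, num_controls, labels,
   PySem.List.pyRange 1 (num_samples + 1) 1,
   PySem.List.pyRange 1 (num_controls + 1) 1)

-- ===== PRECONDITION & SPEC =====
def Spec_count_sheets (name_sheets : List String) (out : Int × Int × List String × List Int × List Int) : Prop := out = count_sheets_alt name_sheets
instance (name_sheets : List String) (out : Int × Int × List String × List Int × List Int) : Decidable (Spec_count_sheets name_sheets out) := by unfold Spec_count_sheets; infer_instance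

-- ===== CLAIM (what is proved, stated in full; the proofs are below) =====
def Claim_equal_count_sheets : Prop := ∀ (name_sheets : List String), Dom_count_sheets name_sheets → Spec_count_sheets name_sheets (count_sheets name_sheets)

-- ===== LEMMAS AND PROOFS =====

-- range splitting: pyRange m (m+(c+1)) starts with m
lemma pv_pyRange_succ (m : Int) (c : Nat) :
    PySem.List.pyRange m (m + ((c : Int) + 1)) 1 = m :: PySem.List.pyRange (m + 1) (m + 1 + c) 1 := by
  have h : m + ((c : Int) + 1) = m + 1 + c := by ring
  rw [h, PySem.List.pyRange_one_cons (by omega)]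

-- the label each sheet contributes (proof-only characterisation of the labels list)
def pvLab (xs : List String) : List String :=
  xs.filterMap (fun sheet =>
    if PySem.Str.isIn "Sample" sheet then some "sample"
    else if PySem.Str.isIn "Control" sheet then some "control"
    else none)

-- B's labels loop computes pvLab
lemma labels_eq (xs : List String) (acc : List String) :
    xs.foldl
      (fun acc sheet =>
        if PySem.Str.isIn "Sample" sheet then acc ++ ["sample"]
        else if PySem.Str.isIn "Control" sheet then acc ++ ["control"]
        else acc) acc = acc ++ pvLab xs := by
  induction xs generalizing acc with
  | nil => simp [pvLab]
  | cons x xs ih =>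
    rw [List.foldl_cons]
    by_cases h1 : PySem.Str.isIn "Sample" x = true
    · have hl : pvLab (x :: xs) = "sample" :: pvLab xs := by
        unfold pvLab; rw [List.filterMap_cons, if_pos h1]
      rw [if_pos h1, ih, hl]; simp
    · by_cases h2 : PySem.Str.isIn "Control" x = true
      · have hl : pvLab (x :: xs) = "control" :: pvLab xs := by
          unfold pvLab; rw [List.filterMap_cons, if_neg h1, if_pos h2]
        rw [if_neg h1, if_pos h2, ih, hl]; simp
      · have hl : pvLab (x :: xs) = pvLab xs := by
          unfold pvLab; rw [List.filterMap_cons, if_neg h1, if_neg h2]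
        rw [if_neg h1, if_neg h2, ih, hl]

-- A's loop with generalized state, characterised by pvLab
lemma A_fold (xs : List String) (ns nc : Int) (sc : List String) (sr cr : List Int) :
    xs.foldl
      (fun st sheet =>
        if PySem.Str.isIn "Sample" sheet then
          (st.1 + 1, st.2.1, st.2.2.1 ++ ["sample"], st.2.2.2.1 ++ [st.1 + 1], st.2.2.2.2)
        else if PySem.Str.isIn "Control" sheet then
          (st.1, st.2.1 + 1, st.2.2.1 ++ ["control"], st.2.2.2.1, st.2.2.2.2 ++ [st.2.1 + 1])
        else st)
      (ns, nc, sc, sr, cr)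
    = (ns + (pvLab xs).count "sample", nc + (pvLab xs).count "control",
       sc ++ pvLab xs,
       sr ++ PySem.List.pyRange (ns + 1) (ns + 1 + (pvLab xs).count "sample") 1,
       cr ++ PySem.List.pyRange (nc + 1) (nc + 1 + (pvLab xs).count "control") 1) := by
  induction xs generalizing ns nc sc sr cr with
  | nil => simp [pvLab, PySem.List.pyRange_one_eq_nil]
  | cons x xs ih =>
    rw [List.foldl_cons]
    by_cases h1 : PySem.Str.isIn "Sample" x = true
    · have hl : pvLab (x :: xs) = "sample" :: pvLab xs := by
        unfold pvLab; rw [List.filterMap_cons, if_pos h1]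
      have hstep : (if PySem.Str.isIn "Sample" x = true then
          (ns + 1, nc, sc ++ ["sample"], sr ++ [ns + 1], cr)
        else if PySem.Str.isIn "Control" x = true then
          (ns, nc + 1, sc ++ ["control"], sr, cr ++ [nc + 1])
        else (ns, nc, sc, sr, cr)) = (ns + 1, nc, sc ++ ["sample"], sr ++ [ns + 1], cr) := by
        rw [if_pos h1]
      simp only [hstep, ih, hl, List.count_cons, Prod.mk.injEq]
      refine ⟨by push_cast; simp; ring, by simp, by simp, ?_, by simp⟩
      push_cast
      norm_num
      rw [pv_pyRange_succ (ns + 1) ((pvLab xs).count "sample")]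
    · by_cases h2 : PySem.Str.isIn "Control" x = true
      · have hl : pvLab (x :: xs) = "control" :: pvLab xs := by
          unfold pvLab; rw [List.filterMap_cons, if_neg h1, if_pos h2]
        have hstep : (if PySem.Str.isIn "Sample" x = true then
            (ns + 1, nc, sc ++ ["sample"], sr ++ [ns + 1], cr)
          else if PySem.Str.isIn "Control" x = true then
            (ns, nc + 1, sc ++ ["control"], sr, cr ++ [nc + 1])
          else (ns, nc, sc, sr, cr)) = (ns, nc + 1, sc ++ ["control"], sr, cr ++ [nc + 1]) := by
          rw [if_neg h1, if_pos h2]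
        simp only [hstep, ih, hl, List.count_cons, Prod.mk.injEq]
        refine ⟨by simp, by push_cast; simp; ring, by simp, by simp, ?_⟩
        push_cast
        norm_num
        rw [pv_pyRange_succ (nc + 1) ((pvLab xs).count "control")]
      · have hl : pvLab (x :: xs) = pvLab xs := by
          unfold pvLab; rw [List.filterMap_cons, if_neg h1, if_neg h2]
        have hstep : (if PySem.Str.isIn "Sample" x = true then
            (ns + 1, nc, sc ++ ["sample"], sr ++ [ns + 1], cr)
          else if PySem.Str.isIn "Control" x = true then
            (ns, nc + 1, sc ++ ["control"], sr, cr ++ [nc + 1])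
          else (ns, nc, sc, sr, cr)) = (ns, nc, sc, sr, cr) := by
          rw [if_neg h1, if_neg h2]
        rw [hstep, ih, hl]

-- ===== VERDICT (by name: the statement is the Claim_ definition above) =====
theorem count_sheets_spec : Claim_equal_count_sheets := by
  intro name_sheets _
  unfold Spec_count_sheets count_sheets count_sheets_alt
  rw [PySem.List.foldl_pyRange_zero_pyGetD name_sheets ""
    (fun st sheet =>
      if PySem.Str.isIn "Sample" sheet then
        (st.1 + 1, st.2.1, st.2.2.1 ++ ["sample"], st.2.2.2.1 ++ [st.1 + 1], st.2.2.2.2)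
      else if PySem.Str.isIn "Control" sheet then
        (st.1, st.2.1 + 1, st.2.2.1 ++ ["control"], st.2.2.2.1, st.2.2.2.2 ++ [st.2.1 + 1])
      else st)
    (0, 0, [], [], [])]
  rw [A_fold, labels_eq]
  norm_num [Int.add_comm]
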